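-- pv_equiv track=rewrite | github.com/arh98/Algorithms-Design | max-sub.py | matrix_to_array
-- ===== SOURCE A (Python) =====
-- def matrix_to_array(matrix):
--     new_arr = []
--     penalty = 0
--     for i, row in enumerate(matrix):
--         row_penalty = min(row)
--         # penalty = min(row) if min(row) < penalty else 0
--         if row_penalty<penalty:
--             penalty = row_penalty
--
--         if i % 2 == 0:
--             new_arr += row + [penalty]
--         else:
--             new_arr += list(reversed(row)) + [penalty]
--     return new_arr
-- ===== SOURCE B (Python) =====
-- from itertools import accumulate
--
--
-- def matrix_to_array(matrix):
--     # pass 1: running minimum of row minima, seeded with 0 (min([]) still raises)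
--     penalties = list(accumulate((min(row) for row in matrix), min, initial=0))[1:]
--     # pass 2: shape the output from (index, row, penalty) triples
--     return [x
--             for i, (row, p) in enumerate(zip(matrix, penalties))
--             for x in (row if i % 2 == 0 else row[::-1]) + [p]]
-- ===== Notes on version B (the rewrite author's own statement) =====
-- stated objective: alternative
-- what changed: Splits the single interleaved loop into two passes: first an itertools.accumulate scan building the whole penalties list (running min of row minima seeded with 0), then a flat comprehension shaping the output from matrix rows zipped with that list.
import Mathlib
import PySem

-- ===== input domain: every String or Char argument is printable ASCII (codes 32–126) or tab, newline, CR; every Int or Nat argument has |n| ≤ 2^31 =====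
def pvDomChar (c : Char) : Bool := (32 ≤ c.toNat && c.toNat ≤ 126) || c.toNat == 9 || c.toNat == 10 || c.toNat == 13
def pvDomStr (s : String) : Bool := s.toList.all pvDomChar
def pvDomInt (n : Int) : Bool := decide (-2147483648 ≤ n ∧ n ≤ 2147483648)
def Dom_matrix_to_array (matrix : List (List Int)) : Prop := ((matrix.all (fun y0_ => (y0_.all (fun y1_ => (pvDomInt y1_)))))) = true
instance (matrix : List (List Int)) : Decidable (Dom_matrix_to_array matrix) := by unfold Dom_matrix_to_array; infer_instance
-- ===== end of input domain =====

-- B replaces A's single interleaved loop by two passes (a scanl building the penalties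
-- list, then a flatMap shaping the output); equal return values on all matrices with
-- no empty row (min([]) raises ValueError in both Pythons on an empty row).

-- ===== PORT A =====
-- one fold over enumerate(matrix) carrying (new_arr, penalty); min([]) raises in
-- Python, so outside Pre_ the port's `.getD 0` value is not claimed
def matrix_to_array (matrix : List (List Int)) : List Int :=
  (List.foldl
    (fun (st : List Int × Int) (pr : Int × List Int) =>
      let row_penalty := (PySem.List.min? pr.2 (fun x => x)).getD 0
      let penalty := if row_penalty < st.2 then row_penalty else st.2
      if pr.1 % 2 == 0 then (st.1 ++ (pr.2 ++ [penalty]), penalty)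
      else (st.1 ++ (pr.2.reverse ++ [penalty]), penalty))
    ([], 0) (PySem.List.enumerate matrix 0)).1

-- ===== PORT B =====
-- pass 1: accumulate(min over row minima, initial=0) then [1:]  (scanl, drop 1);
-- pass 2: flat comprehension over enumerate(zip(matrix, penalties));
-- row[::-1] is ported as List.reverse
def matrix_to_array_alt (matrix : List (List Int)) : List Int :=
  let penalties :=
    ((matrix.map (fun row => (PySem.List.min? row (fun x => x)).getD 0)).scanl min 0).drop 1
  (PySem.List.enumerate (matrix.zip penalties) 0).flatMap
    (fun pr => (if pr.1 % 2 == 0 then pr.2.1 else pr.2.1.reverse) ++ [pr.2.2])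

-- ===== PRECONDITION & SPEC =====
-- Pre_ excludes matrices containing an empty row: there Python's min([]) raises ValueError (in A and in B).
def Pre_matrix_to_array (matrix : List (List Int)) : Prop := ∀ row ∈ matrix, row ≠ []
instance (matrix : List (List Int)) : Decidable (Pre_matrix_to_array matrix) := by
  unfold Pre_matrix_to_array; infer_instance

def pvWitness_matrix_to_array : List (List Int) := [[3, -1, 2], [5, 4], [-7]]

def Spec_matrix_to_array (matrix : List (List Int)) (out : List Int) : Prop := out = matrix_to_array_alt matrix
instance (matrix : List (List Int)) (out : List Int) : Decidable (Spec_matrix_to_array matrix out) := by unfold Spec_matrix_to_array; infer_instance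

-- ===== CLAIM (what is proved, stated in full; the proofs are below) =====
def Claim_equal_matrix_to_array : Prop := ∀ (matrix : List (List Int)), Dom_matrix_to_array matrix → Pre_matrix_to_array matrix → Spec_matrix_to_array matrix (matrix_to_array matrix)

-- ===== LEMMAS AND PROOFS =====

-- row minimum as both ports compute it
def pvRowMin (row : List Int) : Int := (PySem.List.min? row (fun x => x)).getD 0

-- common recursive skeleton of both passes
def pvGo (s p : Int) : List (List Int) → List Int
  | [] => []
  | row :: rest =>
    ((if s % 2 == 0 then row else row.reverse) ++ [min p (pvRowMin row)])
      ++ pvGo (s + 1) (min p (pvRowMin row)) rest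

theorem pv_if_lt_eq_min (r p : Int) : (if r < p then r else p) = min p r := by
  rw [min_def]; split_ifs <;> omega

theorem pvA_go (m : List (List Int)) : ∀ (s : Int) (acc : List Int) (p : Int),
    (List.foldl
      (fun (st : List Int × Int) (pr : Int × List Int) =>
        let row_penalty := (PySem.List.min? pr.2 (fun x => x)).getD 0
        let penalty := if row_penalty < st.2 then row_penalty else st.2
        if pr.1 % 2 == 0 then (st.1 ++ (pr.2 ++ [penalty]), penalty)
        else (st.1 ++ (pr.2.reverse ++ [penalty]), penalty))
      (acc, p) (PySem.List.enumerate m s)).1 = acc ++ pvGo s p m := by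
  induction m with
  | nil => intro s acc p; simp [PySem.List.enumerate_nil, pvGo]
  | cons row rest ih =>
    intro s acc p
    rw [PySem.List.enumerate_cons]
    simp only [List.foldl_cons, pv_if_lt_eq_min] at ih ⊢
    split_ifs with h <;> rw [ih] <;> simp [pvGo, pvRowMin, h, List.append_assoc]

theorem pv_scanl_head (q : Int) (l : List Int) :
    List.scanl min q l = q :: (List.scanl min q l).drop 1 := by
  cases l <;> simp [List.scanl]

theorem pvB_go (m : List (List Int)) : ∀ (s p : Int),
    (PySem.List.enumerate (m.zip (((m.map pvRowMin).scanl min p).drop 1)) s).flatMap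
      (fun pr => (if pr.1 % 2 == 0 then pr.2.1 else pr.2.1.reverse) ++ [pr.2.2])
      = pvGo s p m := by
  induction m with
  | nil => intro s p; simp [PySem.List.enumerate_nil, pvGo]
  | cons row rest ih =>
    intro s p
    simp only [List.map_cons, List.scanl_cons, List.drop_succ_cons]
    rw [pv_scanl_head (min p (pvRowMin row)) (rest.map pvRowMin)]
    rw [List.drop_zero, List.zip_cons_cons, PySem.List.enumerate_cons, List.flatMap_cons,
      ih (s + 1) (min p (pvRowMin row))]
    simp [pvGo]

-- ===== VERDICT (by name: the statement is the Claim_ definition above) =====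
theorem matrix_to_array_spec : Claim_equal_matrix_to_array := by
  intro matrix _ _
  unfold Spec_matrix_to_array matrix_to_array matrix_to_array_alt
  rw [pvA_go matrix 0 [] 0]
  rw [show (fun row => (PySem.List.min? row (fun x => x)).getD 0) = pvRowMin from rfl]
  rw [pvB_go matrix 0 0]
  simp
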